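-- pv_equiv track=rewrite | github.com/JeongkyuKim-git/Language_learning | Python_3/Technology/Word/Word_combination/permutation.py | Make_kmer
-- ===== SOURCE A (Python) =====
-- def Make_kmer(k, listResult=['A', 'C', 'G', 'T']):
--     listNucle = ['A', 'C', 'G', 'T']
--     listTmp = []
--     if k == 1:
--         return listResult
--     else:
--         for nucle1 in listResult:
--             for nucle2 in listNucle:
--                 listTmp.append(nucle1 + nucle2)
--         return Make_kmer(k - 1, listTmp)
-- ===== SOURCE B (Python) =====
-- def Make_kmer(k, listResult=['A', 'C', 'G', 'T']):
--     listNucle = ['A', 'C', 'G', 'T']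
--     result = listResult
--     while k != 1:
--         result = [a + b for a in result for b in listNucle]
--         k -= 1
--     return result
-- ===== Notes on version B (the rewrite author's own statement) =====
-- stated objective: simpler
-- what changed: Replaces the tail recursion with an explicit while-loop that rebinds the accumulator via a flat list comprehension instead of nested append loops.
import Mathlib
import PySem

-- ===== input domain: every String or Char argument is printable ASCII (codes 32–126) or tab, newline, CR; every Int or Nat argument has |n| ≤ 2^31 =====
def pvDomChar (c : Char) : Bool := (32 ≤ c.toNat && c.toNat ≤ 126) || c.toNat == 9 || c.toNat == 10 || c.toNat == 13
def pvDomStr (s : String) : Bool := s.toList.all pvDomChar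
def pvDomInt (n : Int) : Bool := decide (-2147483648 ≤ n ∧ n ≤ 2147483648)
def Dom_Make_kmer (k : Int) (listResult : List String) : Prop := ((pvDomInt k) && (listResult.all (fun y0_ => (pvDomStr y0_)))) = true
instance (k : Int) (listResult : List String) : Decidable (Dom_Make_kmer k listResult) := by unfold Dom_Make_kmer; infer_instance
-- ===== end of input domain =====

-- B rewrites A's recursion as an explicit while-loop threading the accumulator (simpler decomposition, same cost).
-- ===== PORT A =====
-- A's nested for-loops appending nucle1 + nucle2 into listTmp
def Make_kmer_expand (listResult : List String) : List String :=
  listResult.foldl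
    (fun listTmp nucle1 =>
      (["A", "C", "G", "T"]).foldl (fun acc nucle2 => acc ++ [nucle1 ++ nucle2]) listTmp)
    []

def Make_kmer (k : Int) (listResult : List String) : List String :=
  if k == 1 then listResult
  else if k ≤ 0 then listResult  -- totality guard: Python A does not terminate here (outside Pre_)
  else Make_kmer (k - 1) (Make_kmer_expand listResult)
termination_by k.toNat
decreasing_by
  simp only [beq_iff_eq] at *
  omega

-- ===== PORT B =====
-- the body of B's `while k != 1` loop: a single flat comprehension
def Make_kmer_alt_loop : Nat → List String → List String
  | 0, result => result
  | n + 1, result =>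
      Make_kmer_alt_loop n (result.flatMap (fun a => (["A", "C", "G", "T"]).map (fun b => a ++ b)))

def Make_kmer_alt (k : Int) (listResult : List String) : List String :=
  -- while k != 1: the loop runs (k-1) times for k ≥ 1 (Python B diverges for k ≤ 0, outside Pre_)
  Make_kmer_alt_loop (k - 1).toNat listResult

-- ===== PRECONDITION & SPEC =====
-- Pre_ excludes k ≤ 0: there Python A raises RecursionError and Python B loops forever.
def Pre_Make_kmer (k : Int) (listResult : List String) : Prop := 1 ≤ k
instance (k : Int) (listResult : List String) : Decidable (Pre_Make_kmer k listResult) := by unfold Pre_Make_kmer; infer_instance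
def pvWitness_Make_kmer : Int × List String := (2, ["A", "C", "G", "T"])

def Spec_Make_kmer (k : Int) (listResult : List String) (out : List String) : Prop := out = Make_kmer_alt k listResult
instance (k : Int) (listResult : List String) (out : List String) : Decidable (Spec_Make_kmer k listResult out) := by unfold Spec_Make_kmer; infer_instance

-- ===== CLAIM (what is proved, stated in full; the proofs are below) =====
def Claim_equal_Make_kmer : Prop := ∀ (k : Int) (listResult : List String), Dom_Make_kmer k listResult → Pre_Make_kmer k listResult → Spec_Make_kmer k listResult (Make_kmer k listResult)

-- ===== LEMMAS AND PROOFS =====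
-- A's nested append loops produce the same list as B's flat comprehension
theorem Make_kmer_expand_eq (listResult : List String) :
    Make_kmer_expand listResult
      = listResult.flatMap (fun a => (["A", "C", "G", "T"]).map (fun b => a ++ b)) := by
  unfold Make_kmer_expand
  have hstep : (fun (listTmp : List String) (nucle1 : String) =>
      (["A", "C", "G", "T"]).foldl (fun acc nucle2 => acc ++ [nucle1 ++ nucle2]) listTmp)
      = fun listTmp nucle1 => listTmp ++ (["A", "C", "G", "T"]).map (fun b => nucle1 ++ b) := by
    funext listTmp nucle1
    simp [List.foldl]
  rw [hstep, PySem.List.foldl_append_eq_flatMap]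
  simp

theorem Make_kmer_eq_loop (n : Nat) :
    ∀ (k : Int) (listResult : List String), k - 1 = (n : Int) →
      Make_kmer k listResult = Make_kmer_alt_loop n listResult := by
  induction n with
  | zero =>
      intro k listResult h
      have hk : k = 1 := by omega
      subst hk
      simp [Make_kmer, Make_kmer_alt_loop]
  | succ m ih =>
      intro k listResult h
      rw [Make_kmer]
      have h1 : (k == 1) = false := by simp; omega
      have h2 : ¬ k ≤ 0 := by omega
      simp only [h1, if_neg h2]
      rw [Make_kmer_expand_eq, ih (k - 1) _ (by omega)]
      rfl

-- ===== VERDICT (by name: the statement is the Claim_ definition above) =====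
theorem Make_kmer_spec : Claim_equal_Make_kmer := by
  intro k listResult _ hpre
  show Make_kmer k listResult = Make_kmer_alt k listResult
  unfold Make_kmer_alt
  exact Make_kmer_eq_loop (k - 1).toNat k listResult (by unfold Pre_Make_kmer at hpre; omega)
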